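-- pv_equiv track=rewrite | github.com/xjfcnfw3/algorithm | programers/괄호 변환.py | check
-- ===== SOURCE A (Python) =====
-- def check(w):
--     stack = []
--     num_open = 0
--     num_close = 0
--     offset = True
--     for i in w:
--         if i == "(":
--             num_open += 1
--             stack.append(1)
--         elif i == ")":
--             num_close += 1
--             if stack:
--                 stack.pop()
--             else:
--                 offset = False
--     if offset and not stack:
--         return 2
--     elif num_open == num_close:
--         return 1
--     return 0
-- ===== SOURCE B (Python) =====
-- def check(w):
--     if sum(1 for ch in w if ch == '(') != sum(1 for ch in w if ch == ')'):
--         return 0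
--     bal = 0
--     for ch in w:
--         if ch == '(':
--             bal += 1
--         elif ch == ')':
--             bal -= 1
--             if bal < 0:
--                 return 1
--     return 2
-- ===== Notes on version B (the rewrite author's own statement) =====
-- stated objective: alternative
-- what changed: Replaces the stack+flag bookkeeping with an up-front count comparison (counts unequal -> 0) followed by an integer running-balance scan that early-returns 1 the moment the balance goes negative, 2 otherwise; no stack is maintained.
import Mathlib
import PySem

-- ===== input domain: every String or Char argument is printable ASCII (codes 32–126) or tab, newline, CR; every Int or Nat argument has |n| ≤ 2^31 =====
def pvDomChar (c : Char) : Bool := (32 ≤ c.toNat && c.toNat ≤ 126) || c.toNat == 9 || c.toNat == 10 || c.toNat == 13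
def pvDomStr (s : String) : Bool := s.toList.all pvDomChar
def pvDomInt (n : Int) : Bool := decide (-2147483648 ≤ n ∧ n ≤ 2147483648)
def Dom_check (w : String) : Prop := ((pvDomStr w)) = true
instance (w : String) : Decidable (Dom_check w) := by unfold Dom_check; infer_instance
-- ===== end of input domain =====

-- B replaces A's stack+flag bookkeeping with an up-front count comparison plus an
-- early-exit integer running-balance scan (alternative decomposition, same O(n) cost).


-- ===== PORT A =====
-- one step of A's loop over the characters; state = (stack, num_open, num_close, offset)
def checkStep (s : List Int × Int × Int × Bool) (i : Char) : List Int × Int × Int × Bool :=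
  let (stack, num_open, num_close, offset) := s
  if i = '(' then (stack ++ [(1 : Int)], num_open + 1, num_close, offset)
  else if i = ')' then
    if stack ≠ [] then (stack.dropLast, num_open, num_close + 1, offset)
    else (stack, num_open, num_close + 1, false)
  else (stack, num_open, num_close, offset)

def check (w : String) : Int :=
  let r := w.toList.foldl checkStep ([], 0, 0, true)
  if r.2.2.2 && r.1.isEmpty then 2
  else if r.2.1 = r.2.2.1 then 1
  else 0

-- ===== PORT B =====
-- the early-exit balance scan of Source B ('return 1' the moment bal goes negative)
def scanBal : List Char → Int → Int
  | [], _ => 2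
  | c :: rest, bal =>
    if c = '(' then scanBal rest (bal + 1)
    else if c = ')' then
      if bal - 1 < 0 then 1 else scanBal rest (bal - 1)
    else scanBal rest bal

def check_alt (w : String) : Int :=
  if (w.toList.foldl (fun acc ch => if ch == '(' then acc + 1 else acc) (0 : Int)) ≠
     (w.toList.foldl (fun acc ch => if ch == ')' then acc + 1 else acc) (0 : Int)) then 0
  else scanBal w.toList 0

-- ===== PRECONDITION & SPEC =====
def Spec_check (w : String) (out : Int) : Prop := out = check_alt w
instance (w : String) (out : Int) : Decidable (Spec_check w out) := by unfold Spec_check; infer_instance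

-- ===== CLAIM (what is proved, stated in full; the proofs are below) =====
def Claim_equal_check : Prop := ∀ (w : String), Dom_check w → Spec_check w (check w)

-- ===== LEMMAS AND PROOFS =====

-- 'the scan from depth k ever goes below zero' (abstract description of both loops)
def bad : List Char → Nat → Bool
  | [], _ => false
  | c :: rest, k =>
    if c = '(' then bad rest (k + 1)
    else if c = ')' then (if k = 0 then true else bad rest (k - 1))
    else bad rest k

lemma scanBal_eq (l : List Char) : ∀ (k : Nat), scanBal l (k : Int) = if bad l k then 1 else 2 := by
  induction l with
  | nil => intro k; rfl
  | cons c rest ih =>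
    intro k
    by_cases h1 : c = '('
    · simp only [scanBal, bad, if_pos h1]
      rw [show ((k : Int) + 1) = ((k + 1 : Nat) : Int) from by push_cast; ring]
      exact ih (k + 1)
    · by_cases h2 : c = ')'
      · rcases Nat.eq_zero_or_pos k with hk | hk
        · subst hk; simp [scanBal, bad, h1, h2]
        · have hne : k ≠ 0 := Nat.pos_iff_ne_zero.mp hk
          simp only [scanBal, bad, if_neg h1, if_pos h2, if_neg hne]
          rw [if_neg (by omega : ¬ ((k : Int) - 1 < 0)),
              show ((k : Int) - 1) = ((k - 1 : Nat) : Int) from by omega]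
          exact ih (k - 1)
      · simp only [scanBal, bad, if_neg h1, if_neg h2]
        exact ih k

-- once offset is False it stays False; counts keep accumulating
lemma foldA_false (l : List Char) : ∀ (stack : List Int) (no nc : Int),
    ∃ stack', List.foldl checkStep (stack, no, nc, false) l =
      (stack', no + (l.count '(' : Int), nc + (l.count ')' : Int), false) := by
  induction l with
  | nil => intro stack no nc; exact ⟨stack, by simp⟩
  | cons c rest ih =>
    intro stack no nc
    rw [List.foldl_cons]
    by_cases h1 : c = '('
    · subst h1
      obtain ⟨s', hs'⟩ := ih (stack ++ [1]) (no + 1) nc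
      refine ⟨s', ?_⟩
      rw [show checkStep (stack, no, nc, false) '(' = (stack ++ [1], no + 1, nc, false) from by
            simp [checkStep], hs']
      simp [List.count_cons]
      all_goals omega
    · by_cases h2 : c = ')'
      · subst h2
        by_cases hst : stack = []
        · obtain ⟨s', hs'⟩ := ih stack no (nc + 1)
          refine ⟨s', ?_⟩
          rw [show checkStep (stack, no, nc, false) ')' = (stack, no, nc + 1, false) from by
                simp [checkStep, hst], hs']
          simp [List.count_cons]
          all_goals omega
        · obtain ⟨s', hs'⟩ := ih stack.dropLast no (nc + 1)
          refine ⟨s', ?_⟩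
          rw [show checkStep (stack, no, nc, false) ')' = (stack.dropLast, no, nc + 1, false) from by
                simp [checkStep, hst], hs']
          simp [List.count_cons]
          all_goals omega
      · obtain ⟨s', hs'⟩ := ih stack no nc
        refine ⟨s', ?_⟩
        rw [show checkStep (stack, no, nc, false) c = (stack, no, nc, false) from by
              simp [checkStep, h1, h2], hs']
        simp [List.count_cons]
        exact ⟨h1, h2⟩

-- the main invariant of A's loop while offset is still True
lemma foldA_true (l : List Char) : ∀ (stack : List Int) (no nc : Int),
    ∃ stack', List.foldl checkStep (stack, no, nc, true) l =
      (stack', no + (l.count '(' : Int), nc + (l.count ')' : Int), !bad l stack.length) ∧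
      (bad l stack.length = false →
        stack'.length + l.count ')' = stack.length + l.count '(') := by
  induction l with
  | nil => intro stack no nc; exact ⟨stack, by simp [bad], by simp⟩
  | cons c rest ih =>
    intro stack no nc
    rw [List.foldl_cons]
    by_cases h1 : c = '('
    · subst h1
      obtain ⟨s', hs', hlen⟩ := ih (stack ++ [1]) (no + 1) nc
      have hb : bad ('(' :: rest) stack.length = bad rest (stack.length + 1) := by
        simp [bad]
      refine ⟨s', ?_, ?_⟩
      · rw [show checkStep (stack, no, nc, true) '(' = (stack ++ [1], no + 1, nc, true) from by
              simp [checkStep], hs', hb]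
        simp [List.count_cons]
        all_goals omega
      · intro hbf
        rw [hb] at hbf
        have := hlen (by simpa using hbf)
        simp only [List.length_append, List.length_cons, List.length_nil] at this
        simp [List.count_cons]
        omega
    · by_cases h2 : c = ')'
      · subst h2
        by_cases hst : stack = []
        · subst hst
          obtain ⟨s', hs'⟩ := foldA_false rest [] no (nc + 1)
          have hb : bad (')' :: rest) ([] : List Int).length = true := by simp [bad]
          refine ⟨s', ?_, ?_⟩
          · rw [show checkStep (([] : List Int), no, nc, true) ')' = ([], no, nc + 1, false) from by
                  simp [checkStep], hs', hb]
            simp [List.count_cons]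
            all_goals omega
          · intro hbf; rw [hb] at hbf; exact absurd hbf (by simp)
        · obtain ⟨s', hs', hlen⟩ := ih stack.dropLast no (nc + 1)
          have hk : stack.length ≠ 0 := by simp [hst]
          have hb : bad (')' :: rest) stack.length = bad rest (stack.length - 1) := by
            simp [bad, hk]
          refine ⟨s', ?_, ?_⟩
          · rw [show checkStep (stack, no, nc, true) ')' = (stack.dropLast, no, nc + 1, true) from by
                  simp [checkStep, hst], hs', hb]
            simp [List.count_cons, List.length_dropLast]
            all_goals omega
          · intro hbf
            rw [hb] at hbf
            have := hlen (by simpa [List.length_dropLast] using hbf)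
            simp only [List.length_dropLast] at this
            simp [List.count_cons]
            omega
      · obtain ⟨s', hs', hlen⟩ := ih stack no nc
        have hb : bad (c :: rest) stack.length = bad rest stack.length := by
          simp [bad, h1, h2]
        refine ⟨s', ?_, ?_⟩
        · rw [show checkStep (stack, no, nc, true) c = (stack, no, nc, true) from by
                simp [checkStep, h1, h2], hs', hb]
          simp [List.count_cons]
          exact ⟨h1, h2⟩
        · intro hbf
          rw [hb] at hbf
          have := hlen hbf
          simp [List.count_cons, h1, h2]
          omega

-- ===== VERDICT (by name: the statement is the Claim_ definition above) =====
theorem check_spec : Claim_equal_check := by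
  intro w _
  unfold Spec_check check check_alt
  obtain ⟨s', hs', hlen⟩ := foldA_true w.toList [] 0 0
  simp only [List.length_nil] at hs' hlen
  rw [hs']
  rw [PySem.List.foldl_beq_add_one, PySem.List.foldl_beq_add_one]
  have hscan := scanBal_eq w.toList 0
  norm_num at hscan ⊢
  by_cases hc : w.toList.count '(' = w.toList.count ')'
  · by_cases hb : bad w.toList 0
    · simp [hb, hc, hscan]
    · have hl := hlen (by simpa using hb)
      have hse : s' = [] := by
        have : s'.length = 0 := by omega
        exact List.length_eq_zero_iff.mp this
      simp [hb, hse, hc, hscan]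
  · by_cases hb : bad w.toList 0
    · simp [hb, hc]
    · have hl := hlen (by simpa using hb)
      have hse : ¬ s' = [] := by
        intro h; subst h; simp at hl; omega
      simp [hb, hse, hc]
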